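-- pv_equiv track=rewrite | github.com/alexandreandre/beta_test | backend_calculs/scripts/alloc/alloc_AI.py | prioritize_urls
-- ===== SOURCE A (Python) =====
-- from typing import Optional, Dict, Any, List, Tuple
--
-- def prioritize_urls(urls: List[str]) -> List[str]:
--     """Priorise urssaf.fr puis service-public.fr puis le reste."""
--     seen = set()
--     def dedup(seq):
--         out = []
--         for u in seq:
--             if u not in seen:
--                 seen.add(u)
--                 out.append(u)
--         return out
--     urssaf = dedup([u for u in urls if "urssaf.fr" in u])
--     sp = dedup([u for u in urls if "service-public.fr" in u])
--     others = dedup([u for u in urls if "urssaf.fr" not in u and "service-public.fr" not in u])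
--     return urssaf + sp + others
-- ===== SOURCE B (Python) =====
-- def prioritize_urls(urls):
--     """Priorise urssaf.fr puis service-public.fr puis le reste."""
--     seen = set()
--     urssaf, sp, others = [], [], []
--     for u in urls:
--         if u in seen:
--             continue
--         seen.add(u)
--         if "urssaf.fr" in u:
--             urssaf.append(u)
--         elif "service-public.fr" in u:
--             sp.append(u)
--         else:
--             others.append(u)
--     return urssaf + sp + others
-- ===== Notes on version B (the rewrite author's own statement) =====
-- stated objective: simpler
-- what changed: Replaces the three filtered passes with shared dedup state by a single loop over urls maintaining one seen set and three buckets dispatched by if/elif/else.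
import Mathlib
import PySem

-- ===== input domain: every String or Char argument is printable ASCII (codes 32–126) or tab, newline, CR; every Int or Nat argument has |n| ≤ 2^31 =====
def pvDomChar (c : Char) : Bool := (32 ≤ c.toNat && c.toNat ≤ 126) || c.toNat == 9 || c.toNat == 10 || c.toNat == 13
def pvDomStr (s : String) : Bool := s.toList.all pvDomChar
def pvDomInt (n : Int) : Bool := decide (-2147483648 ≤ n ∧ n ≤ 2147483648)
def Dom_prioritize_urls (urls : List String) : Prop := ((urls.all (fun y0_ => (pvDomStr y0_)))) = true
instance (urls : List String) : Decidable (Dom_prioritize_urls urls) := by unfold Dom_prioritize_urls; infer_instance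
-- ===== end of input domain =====

-- B replaces A's three filtered passes over `urls` (sharing one seen set) by a single
-- loop dispatching each unseen url into one of three buckets via if/elif/else (objective: simpler).

-- ===== PORT A =====
-- A's inner closure `dedup(seq)`: folds over seq with state (out, seen)
def pvDedupA (seq : List String) (seen : PySem.Set String) :
    List String × PySem.Set String :=
  seq.foldl
    (fun st u =>
      if PySem.Set.contains st.2 u then st
      else (st.1 ++ [u], PySem.Set.add st.2 u))
    ([], seen)

def prioritize_urls (urls : List String) : List String :=
  let seen : PySem.Set String := PySem.Set.empty
  let p1 := pvDedupA (urls.filter (fun u => PySem.Str.isIn "urssaf.fr" u)) seen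
  let p2 := pvDedupA (urls.filter (fun u => PySem.Str.isIn "service-public.fr" u)) p1.2
  let p3 := pvDedupA (urls.filter (fun u =>
      !PySem.Str.isIn "urssaf.fr" u && !PySem.Str.isIn "service-public.fr" u)) p2.2
  p1.1 ++ p2.1 ++ p3.1

-- ===== PORT B =====
-- single loop, state = (seen, urssaf, sp, others)
def prioritize_urls_alt (urls : List String) : List String :=
  let st := urls.foldl
    (fun (st : PySem.Set String × List String × List String × List String) u =>
      if PySem.Set.contains st.1 u then st
      else
        let s := PySem.Set.add st.1 u
        if PySem.Str.isIn "urssaf.fr" u then (s, st.2.1 ++ [u], st.2.2.1, st.2.2.2)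
        else if PySem.Str.isIn "service-public.fr" u then (s, st.2.1, st.2.2.1 ++ [u], st.2.2.2)
        else (s, st.2.1, st.2.2.1, st.2.2.2 ++ [u]))
    (PySem.Set.empty, [], [], [])
  st.2.1 ++ st.2.2.1 ++ st.2.2.2

-- ===== PRECONDITION & SPEC =====
def Spec_prioritize_urls (urls : List String) (out : List String) : Prop := out = prioritize_urls_alt urls
instance (urls : List String) (out : List String) : Decidable (Spec_prioritize_urls urls out) := by unfold Spec_prioritize_urls; infer_instance

-- ===== CLAIM (what is proved, stated in full; the proofs are below) =====
def Claim_equal_prioritize_urls : Prop := ∀ (urls : List String), Dom_prioritize_urls urls → Spec_prioritize_urls urls (prioritize_urls urls)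

-- ===== LEMMAS AND PROOFS =====

-- ordered first-occurrence dedup relative to an already-seen list S
def pvDD (S : List String) : List String → List String
  | [] => []
  | u :: rest => if u ∈ S then pvDD S rest else u :: pvDD (S ++ [u]) rest

theorem mem_of_mem_pvDD {v : String} : ∀ (xs S : List String), v ∈ pvDD S xs → v ∈ xs := by
  intro xs
  induction xs with
  | nil => intro S h; simp [pvDD] at h
  | cons u rest ih =>
    intro S h
    simp only [pvDD] at h
    split at h
    · exact List.mem_cons_of_mem _ (ih _ h)
    · rcases List.mem_cons.mp h with h | h
      · simp [h]
      · exact List.mem_cons_of_mem _ (ih _ h)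

theorem pvDD_congr : ∀ (xs S S' : List String),
    (∀ u ∈ xs, u ∈ S ↔ u ∈ S') → pvDD S xs = pvDD S' xs := by
  intro xs
  induction xs with
  | nil => intros; rfl
  | cons u rest ih =>
    intro S S' h
    have hu := h u (by simp)
    by_cases hm : u ∈ S
    · have hm' : u ∈ S' := hu.mp hm
      simp only [pvDD, if_pos hm, if_pos hm']
      exact ih S S' (fun v hv => h v (List.mem_cons_of_mem _ hv))
    · have hm' : u ∉ S' := fun c => hm (hu.mpr c)
      simp only [pvDD, if_neg hm, if_neg hm']
      have := ih (S ++ [u]) (S' ++ [u]) (fun v hv => by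
        simp only [List.mem_append, List.mem_singleton]
        constructor
        · rintro (h1 | h1)
          · exact Or.inl ((h v (List.mem_cons_of_mem _ hv)).mp h1)
          · exact Or.inr h1
        · rintro (h1 | h1)
          · exact Or.inl ((h v (List.mem_cons_of_mem _ hv)).mpr h1)
          · exact Or.inr h1)
      rw [this]

-- filter commutes with dedup
theorem pvDD_filter_comm (p : String → Bool) : ∀ (xs S : List String),
    (pvDD S xs).filter p = pvDD S (xs.filter p) := by
  intro xs
  induction xs with
  | nil => intro S; rfl
  | cons u rest ih =>
    intro S
    by_cases hp : p u
    · by_cases hm : u ∈ S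
      · simp only [pvDD, List.filter_cons, hp, if_true, if_pos hm]
        exact ih S
      · simp only [pvDD, if_neg hm, List.filter_cons, hp, if_true]
        rw [ih]
    · by_cases hm : u ∈ S
      · simp only [pvDD, if_pos hm, List.filter_cons, hp]
        exact ih S
      · simp only [pvDD, if_neg hm, List.filter_cons, hp, Bool.false_eq_true, if_false]
        rw [ih (S ++ [u])]
        exact pvDD_congr _ _ _ (fun v hv => by
          have hpv : p v = true := (List.mem_filter.mp hv).2
          have hne : v ≠ u := fun e => by rw [e] at hpv; simp [hpv] at hp
          simp [List.mem_append, hne])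

-- swap the seen list for a filtered rest, under membership compatibility
theorem pvDD_seen (q : String → Bool) : ∀ (xs S S' : List String),
    (∀ u ∈ xs, (q u = false → u ∈ S) ∧ (q u = true → (u ∈ S ↔ u ∈ S'))) →
    pvDD S xs = pvDD S' (xs.filter q) := by
  intro xs
  induction xs with
  | nil => intros; rfl
  | cons u rest ih =>
    intro S S' h
    have hu := h u (by simp)
    have hrest : ∀ v ∈ rest, (q v = false → v ∈ S) ∧ (q v = true → (v ∈ S ↔ v ∈ S')) :=
      fun v hv => h v (List.mem_cons_of_mem _ hv)
    by_cases hq : q u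
    · by_cases hm : u ∈ S
      · have hm' : u ∈ S' := ((hu.2 hq).mp hm)
        simp only [pvDD, if_pos hm, List.filter_cons, hq, if_true, pvDD, if_pos hm']
        exact ih S S' hrest
      · have hm' : u ∉ S' := fun c => hm ((hu.2 hq).mpr c)
        simp only [pvDD, if_neg hm, List.filter_cons, hq, if_true, pvDD, if_neg hm']
        congr 1
        exact ih (S ++ [u]) (S' ++ [u]) (fun v hv => by
          rcases hrest v hv with ⟨h1, h2⟩
          refine ⟨fun hf => List.mem_append_left _ (h1 hf), fun ht => ?_⟩
          simp only [List.mem_append, List.mem_singleton]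
          constructor
          · rintro (c | c)
            · exact Or.inl ((h2 ht).mp c)
            · exact Or.inr c
          · rintro (c | c)
            · exact Or.inl ((h2 ht).mpr c)
            · exact Or.inr c)
    · have hm : u ∈ S := hu.1 (by simp [hq])
      simp only [pvDD, if_pos hm, List.filter_cons, hq, Bool.false_eq_true, if_false]
      exact ih S S' hrest

-- A's dedup fold computes pvDD, and the seen set grows by exactly the kept elements
theorem foldA_eq : ∀ (seq acc S : List String),
    seq.foldl
      (fun st u =>
        if PySem.Set.contains st.2 u then st
        else (st.1 ++ [u], PySem.Set.add st.2 u))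
      (acc, S)
    = (acc ++ pvDD S seq, S ++ pvDD S seq) := by
  intro seq
  induction seq with
  | nil => intro acc S; simp [pvDD]
  | cons u rest ih =>
    intro acc S
    by_cases hm : u ∈ S
    · have hc : PySem.Set.contains S u = true := by
        simp [PySem.Set.contains]; exact hm
      simp only [List.foldl_cons, hc, if_true, pvDD, if_pos hm]
      exact ih acc S
    · have hc : PySem.Set.contains S u = false := by
        simp [PySem.Set.contains]; exact hm
      have hadd : PySem.Set.add S u = S ++ [u] := by
        simp [PySem.Set.add, PySem.Set.contains]; intro c; exact absurd c hm
      simp only [List.foldl_cons, hc, Bool.false_eq_true, if_false, hadd, pvDD, if_neg hm]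
      rw [ih (acc ++ [u]) (S ++ [u])]
      simp [List.append_assoc]

def pvC1 (u : String) : Bool := PySem.Str.isIn "urssaf.fr" u
def pvC2 (u : String) : Bool := PySem.Str.isIn "service-public.fr" u

-- B's single fold: kept elements are pvDD S urls, split into buckets by category
theorem foldB_eq : ∀ (xs S l1 l2 l3 : List String),
    xs.foldl
      (fun (st : PySem.Set String × List String × List String × List String) u =>
        if PySem.Set.contains st.1 u then st
        else
          let s := PySem.Set.add st.1 u
          if PySem.Str.isIn "urssaf.fr" u then (s, st.2.1 ++ [u], st.2.2.1, st.2.2.2)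
          else if PySem.Str.isIn "service-public.fr" u then (s, st.2.1, st.2.2.1 ++ [u], st.2.2.2)
          else (s, st.2.1, st.2.2.1, st.2.2.2 ++ [u]))
      (S, l1, l2, l3)
    = (S ++ pvDD S xs,
       l1 ++ (pvDD S xs).filter (fun u => pvC1 u),
       l2 ++ (pvDD S xs).filter (fun u => !pvC1 u && pvC2 u),
       l3 ++ (pvDD S xs).filter (fun u => !pvC1 u && !pvC2 u)) := by
  intro xs
  induction xs with
  | nil => intro S l1 l2 l3; simp [pvDD]
  | cons u rest ih =>
    intro S l1 l2 l3
    by_cases hm : u ∈ S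
    · have hc : PySem.Set.contains S u = true := by
        simp [PySem.Set.contains]; exact hm
      simp only [List.foldl_cons, hc, if_true, pvDD, if_pos hm]
      exact ih S l1 l2 l3
    · have hc : PySem.Set.contains S u = false := by
        simp [PySem.Set.contains]; exact hm
      have hadd : PySem.Set.add S u = S ++ [u] := by
        simp [PySem.Set.add, PySem.Set.contains]; intro c; exact absurd c hm
      simp only [List.foldl_cons, hc, Bool.false_eq_true, if_false, hadd, pvDD, if_neg hm]
      by_cases h1 : PySem.Str.isIn "urssaf.fr" u
      · have hp1 : pvC1 u = true := h1
        simp only [h1, if_true]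
        rw [ih (S ++ [u]) (l1 ++ [u]) l2 l3]
        simp [hp1, List.append_assoc]
      · have hp1 : pvC1 u = false := by simpa [pvC1] using h1
        have h1' : PySem.Str.isIn "urssaf.fr" u = false := hp1
        simp only [h1', Bool.false_eq_true, if_false]
        by_cases h2 : PySem.Str.isIn "service-public.fr" u
        · have hp2 : pvC2 u = true := h2
          simp only [h2, if_true]
          rw [ih (S ++ [u]) l1 (l2 ++ [u]) l3]
          simp [hp1, hp2, List.append_assoc]
        · have hp2 : pvC2 u = false := by simpa [pvC2] using h2
          have h2' : PySem.Str.isIn "service-public.fr" u = false := hp2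
          simp only [h2', Bool.false_eq_true, if_false]
          rw [ih (S ++ [u]) l1 l2 (l3 ++ [u])]
          simp [hp1, hp2, List.append_assoc]

theorem mem_pvDD_of_mem {v : String} : ∀ (xs S : List String), v ∈ xs → v ∉ S → v ∈ pvDD S xs := by
  intro xs
  induction xs with
  | nil => intro S h _; simp at h
  | cons u rest ihx =>
    intro S h hns
    rcases List.mem_cons.mp h with h | h
    · subst h
      simp [pvDD, if_neg hns]
    · by_cases hm : u ∈ S
      · simp only [pvDD, if_pos hm]; exact ihx S h hns
      · simp only [pvDD, if_neg hm]
        by_cases hvu : v = u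
        · simp [hvu]
        · exact List.mem_cons_of_mem _ (ihx (S ++ [u]) h (by
            simp [List.mem_append, hvu]; exact hns))

-- ===== VERDICT (by name: the statement is the Claim_ definition above) =====
theorem prioritize_urls_spec : Claim_equal_prioritize_urls := by
  intro urls _
  unfold Spec_prioritize_urls
  simp only [prioritize_urls, prioritize_urls_alt, pvDedupA]
  rw [foldA_eq, foldA_eq, foldA_eq, foldB_eq]
  simp only [List.nil_append, PySem.Set.empty]
  set L1 := urls.filter (fun u => PySem.Str.isIn "urssaf.fr" u) with hL1
  set L2 := urls.filter (fun u => PySem.Str.isIn "service-public.fr" u) with hL2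
  set L3 := urls.filter (fun u =>
      !PySem.Str.isIn "urssaf.fr" u && !PySem.Str.isIn "service-public.fr" u) with hL3
  have hmemL1 : ∀ v ∈ L1, pvC1 v = true := by
    intro v hv; exact (List.mem_filter.mp (hL1 ▸ hv)).2
  have hmemL2 : ∀ v ∈ L2, pvC2 v = true := by
    intro v hv; exact (List.mem_filter.mp (hL2 ▸ hv)).2
  -- piece 1
  have e1 : pvDD ([] : List String) L1 = (pvDD [] urls).filter (fun u => pvC1 u) := by
    rw [pvDD_filter_comm]; rfl
  -- piece 2
  have e2 : pvDD (pvDD [] L1) L2 = (pvDD [] urls).filter (fun u => !pvC1 u && pvC2 u) := by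
    rw [pvDD_filter_comm]
    have hsplit : urls.filter (fun u => !pvC1 u && pvC2 u) = L2.filter (fun u => !pvC1 u) := by
      rw [hL2, List.filter_filter]
      rfl
    rw [hsplit]
    apply pvDD_seen
    intro v hv
    have hvurls : v ∈ urls := (List.mem_filter.mp (hL2 ▸ hv)).1
    constructor
    · intro hf
      have h1 : pvC1 v = true := by simpa using hf
      exact mem_pvDD_of_mem L1 []
        (hL1 ▸ List.mem_filter.mpr ⟨hvurls, h1⟩) (by simp)
    · intro ht
      have h1 : pvC1 v = false := by simpa using ht
      constructor
      · intro hmem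
        exact absurd (hmemL1 v (mem_of_mem_pvDD _ _ hmem)) (by simp [h1])
      · intro h; simp at h
  -- piece 3
  have e3 : pvDD (pvDD [] L1 ++ pvDD (pvDD [] L1) L2) L3
      = (pvDD [] urls).filter (fun u => !pvC1 u && !pvC2 u) := by
    rw [pvDD_filter_comm]
    have hL3' : urls.filter (fun u => !pvC1 u && !pvC2 u) = L3 := by
      rw [hL3]
      rfl
    rw [hL3']
    have := pvDD_seen (fun _ => true) L3
        (pvDD [] L1 ++ pvDD (pvDD [] L1) L2) []
        (by
          intro v hv
          refine ⟨fun hf => by simp at hf, fun _ => ?_⟩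
          have hv' := hv
          rw [hL3] at hv'
          have hv3 : (!pvC1 v && !pvC2 v) = true := (List.mem_filter.mp hv').2
          obtain ⟨hnc1, hnc2⟩ : pvC1 v = false ∧ pvC2 v = false := by
            simpa using hv3
          constructor
          · intro hmem
            exfalso
            rcases List.mem_append.mp hmem with hmem | hmem
            · exact absurd (hmemL1 v (mem_of_mem_pvDD _ _ hmem)) (by simp [hnc1])
            · exact absurd (hmemL2 v (mem_of_mem_pvDD _ _ hmem)) (by simp [hnc2])
          · intro h; simp at h)
    rw [this, List.filter_true]
  rw [e3, e2, e1]
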